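-- pv_equiv track=rewrite | github.com/ndsev/zserio | test/language/indexed_offsets/python/PackedIndexedOffsetArrayHolderTest.py | _calcAutoIndexedOffsetArrayBitSize
-- ===== SOURCE A (Python) =====
-- def _calcAutoIndexedOffsetArrayBitSize(numElements):
--     bitSize = 0
--     for _ in range(numElements + 1):
--         bitSize += 32 # offset[i]
--         bitSize += 32 # offsets[1]
--         bitSize += 32 # value[i]
--     for _ in range(numElements):
--         bitSize += 32 # data1[i]
--     for _ in range(numElements):
--         bitSize += 32 # data2[i]
--
--     return bitSize
-- ===== SOURCE B (Python) =====
-- def _calcAutoIndexedOffsetArrayBitSize(numElements):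
--     # Closed form: the three 32-bit fields per (numElements+1) iterations
--     # plus two 32-bit fields per numElements iterations; empty ranges for
--     # negative counts are handled by max(..., 0).
--     return 96 * max(numElements + 1, 0) + 64 * max(numElements, 0)
-- ===== Notes on version B (the rewrite author's own statement) =====
-- stated objective: faster
-- what changed: Replaced the three counting loops by a single closed-form arithmetic expression over the clamped element count.
import Mathlib
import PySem

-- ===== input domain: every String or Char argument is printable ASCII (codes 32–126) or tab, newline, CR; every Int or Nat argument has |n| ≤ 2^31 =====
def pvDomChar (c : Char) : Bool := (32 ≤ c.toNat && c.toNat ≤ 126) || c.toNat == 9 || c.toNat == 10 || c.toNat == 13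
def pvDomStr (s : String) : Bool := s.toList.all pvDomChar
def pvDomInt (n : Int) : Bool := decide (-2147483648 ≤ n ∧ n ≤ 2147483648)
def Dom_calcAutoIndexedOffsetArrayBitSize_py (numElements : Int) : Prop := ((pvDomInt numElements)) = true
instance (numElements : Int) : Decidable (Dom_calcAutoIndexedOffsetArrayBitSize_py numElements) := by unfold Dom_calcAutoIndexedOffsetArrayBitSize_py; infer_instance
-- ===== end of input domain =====

-- B replaces A's three counting loops by a closed-form arithmetic expression (faster).

-- ===== PORT A =====
def calcAutoIndexedOffsetArrayBitSize_py (numElements : Int) : Int :=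
  let bitSize : Int := 0
  let bitSize := (PySem.List.pyRange 0 (numElements + 1) 1).foldl
    (fun b _ => ((b + 32) + 32) + 32) bitSize
  let bitSize := (PySem.List.pyRange 0 numElements 1).foldl (fun b _ => b + 32) bitSize
  let bitSize := (PySem.List.pyRange 0 numElements 1).foldl (fun b _ => b + 32) bitSize
  bitSize

-- ===== PORT B =====
def calcAutoIndexedOffsetArrayBitSize_py_alt (numElements : Int) : Int :=
  96 * max (numElements + 1) 0 + 64 * max numElements 0

-- ===== PRECONDITION & SPEC =====
def Spec_calcAutoIndexedOffsetArrayBitSize_py (numElements : Int) (out : Int) : Prop := out = calcAutoIndexedOffsetArrayBitSize_py_alt numElements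
instance (numElements : Int) (out : Int) : Decidable (Spec_calcAutoIndexedOffsetArrayBitSize_py numElements out) := by unfold Spec_calcAutoIndexedOffsetArrayBitSize_py; infer_instance

-- ===== CLAIM (what is proved, stated in full; the proofs are below) =====
def Claim_equal_calcAutoIndexedOffsetArrayBitSize_py : Prop := ∀ (numElements : Int), Dom_calcAutoIndexedOffsetArrayBitSize_py numElements → Spec_calcAutoIndexedOffsetArrayBitSize_py numElements (calcAutoIndexedOffsetArrayBitSize_py numElements)

-- ===== LEMMAS AND PROOFS =====
theorem pv_foldl_const_add (c : Int) (l : List Int) (init : Int) :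
    l.foldl (fun b _ => b + c) init = init + c * l.length := by
  induction l generalizing init with
  | nil => simp
  | cons x xs ih => simp [List.foldl, ih]; ring

-- ===== VERDICT (by name: the statement is the Claim_ definition above) =====
theorem calcAutoIndexedOffsetArrayBitSize_py_spec : Claim_equal_calcAutoIndexedOffsetArrayBitSize_py := by
  intro n _
  show calcAutoIndexedOffsetArrayBitSize_py n = calcAutoIndexedOffsetArrayBitSize_py_alt n
  unfold calcAutoIndexedOffsetArrayBitSize_py calcAutoIndexedOffsetArrayBitSize_py_alt
  have h1 : (fun (b : Int) (_ : Int) => ((b + 32) + 32) + 32) = (fun b _ => b + 96) := by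
    funext b x; ring
  simp only [h1, pv_foldl_const_add, PySem.List.length_pyRange_one]
  omega
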